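-- pv_equiv track=rewrite | github.com/AaronFive/StageHyperpieces | fpt_alphabet_size.py | allPermutationsAfterElement
-- ===== SOURCE A (Python) =====
-- def allPermutationsAfterElement(lst, i):
--     """Returns the list of all permutations of lst keeping the i first elements in place.
--
--     Args:
--         lst (list): list of elements to permute
--         i (int): Empty set to fill with all sources.
--
--     Returns:
--         list: List of permutations
--     """
--     result = []
--     if i == len(lst) - 1:
--         result = [lst]
--     else:
--         for j in range(i, len(lst)):
--             list2 = lst.copy()
--             list2[i] = lst[j]
--             list2[j] = lst[i]
--             permutations = allPermutationsAfterElement(list2, i + 1)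
--             for permutation in permutations:
--                 result.append(permutation)
--     return result
-- ===== SOURCE B (Python) =====
-- def allPermutationsAfterElement(lst, i):
--     """Iterative DFS with an explicit stack instead of recursion; same output order."""
--     result = []
--     stack = [(lst, i)]
--     while stack:
--         cur, pos = stack.pop()
--         if pos == len(cur) - 1:
--             result.append(cur)
--         else:
--             for j in reversed(range(pos, len(cur))):
--                 nxt = cur.copy()
--                 nxt[pos] = cur[j]
--                 nxt[j] = cur[pos]
--                 stack.append((nxt, pos + 1))
--     return result
-- ===== Notes on version B (the rewrite author's own statement) =====
-- stated objective: alternative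
-- what changed: Replaced A's recursion by an iterative depth-first traversal with an explicit stack of (list, position) states, pushing the swapped children in reverse index order so the output sequence is identical.
import Mathlib
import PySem

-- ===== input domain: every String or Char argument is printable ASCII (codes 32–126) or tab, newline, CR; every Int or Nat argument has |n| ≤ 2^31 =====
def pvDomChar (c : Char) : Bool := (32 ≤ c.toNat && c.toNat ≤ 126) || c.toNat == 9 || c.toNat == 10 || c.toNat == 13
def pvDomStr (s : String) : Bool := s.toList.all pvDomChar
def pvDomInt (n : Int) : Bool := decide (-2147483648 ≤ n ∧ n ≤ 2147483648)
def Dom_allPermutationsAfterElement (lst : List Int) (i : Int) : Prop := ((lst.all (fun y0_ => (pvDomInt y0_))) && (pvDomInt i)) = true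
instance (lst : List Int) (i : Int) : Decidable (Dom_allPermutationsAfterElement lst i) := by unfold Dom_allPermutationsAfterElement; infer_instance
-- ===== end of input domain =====

-- B replaces A's recursion by an explicit-stack iterative DFS producing the same output order ("alternative", not faster).

-- ===== PORT A =====
-- literal port of the recursive swap enumeration; pyGetD/pySetD model lst[j] / list2[i] = … (total under Pre_)
def allPermutationsAfterElement (lst : List Int) (i : Int) : List (List Int) :=
  if i = (lst.length : Int) - 1 then [lst]
  else
    (PySem.List.pyRange i (lst.length : Int) 1).attach.foldl
      (fun result j =>
        result ++ allPermutationsAfterElement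
          (PySem.List.pySetD (PySem.List.pySetD lst i (PySem.List.pyGetD lst j.1 0)) j.1
            (PySem.List.pyGetD lst i 0)) (i + 1)) []
  termination_by ((lst.length : Int) - i).toNat
  decreasing_by
    have hj := (PySem.List.mem_pyRange_one).1 j.2
    simp only [PySem.List.length_pySetD]
    omega

-- ===== PORT B =====
-- weight of one stack entry's DFS subtree (termination measure for the while-loop)
def pvW : Nat → Nat
  | 0 => 1
  | r + 1 => 1 + (r + 1) * pvW r

theorem pvW_pos (n : Nat) : 0 < pvW n := by
  cases n <;> simp [pvW]

theorem pvW_step (w : Nat) : w * pvW (w - 1) < pvW w := by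
  cases w with
  | zero => simp [pvW]
  | succ r => simp [pvW]

-- pushing with cons in a foldl = reverse-map prepended (shape of the push loop)
theorem pv_foldl_cons {α β : Type} (f : α → β) (l : List α) (rest : List β) :
    l.foldl (fun st j => f j :: st) rest = l.reverse.map f ++ rest := by
  induction l generalizing rest with
  | nil => simp
  | cons x xs ih => simp [ih]

-- while stack: pop (cur, pos); either emit cur or push the swapped states for j = len-1 … pos
def pvLoop : List (List Int × Int) → List (List Int) → List (List Int)
  | [], result => result
  | (cur, pos) :: rest, result =>
    if pos = (cur.length : Int) - 1 then
      pvLoop rest (result ++ [cur])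
    else
      pvLoop ((PySem.List.pyRange pos (cur.length : Int) 1).reverse.foldl
        (fun st j =>
          (PySem.List.pySetD (PySem.List.pySetD cur pos (PySem.List.pyGetD cur j 0)) j
             (PySem.List.pyGetD cur pos 0), pos + 1) :: st) rest) result
  termination_by stack _ => (stack.map (fun cp => pvW (((cp.1.length : Int) - cp.2).toNat))).sum
  decreasing_by
  · have := pvW_pos (((cur.length : Int) - pos).toNat)
    simp only [List.map_cons, List.sum_cons]
    omega
  · rw [pv_foldl_cons]
    simp only [List.map_append, List.sum_append, List.map_map, List.map_reverse,
      List.map_cons, List.sum_cons, Function.comp_def, PySem.List.length_pySetD,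
      List.sum_reverse]
    have hlen : ((PySem.List.pyRange pos (cur.length : Int) 1).map
        (fun _ => pvW (((cur.length : Int) - (pos + 1)).toNat))).sum
        = ((cur.length : Int) - pos).toNat * pvW ((((cur.length : Int) - pos).toNat) - 1) := by
      rw [List.map_const', List.sum_replicate, PySem.List.length_pyRange_one, smul_eq_mul]
      congr 2
      omega
    rw [hlen]
    have := pvW_step (((cur.length : Int) - pos).toNat)
    omega

def allPermutationsAfterElement_alt (lst : List Int) (i : Int) : List (List Int) :=
  pvLoop [(lst, i)] []

-- ===== PRECONDITION & SPEC =====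
-- Pre_ excludes exactly the inputs where the Python A raises IndexError (i below -len(lst),
-- except the degenerate lst = [], i = -1 where the base case fires first).
def Pre_allPermutationsAfterElement (lst : List Int) (i : Int) : Prop :=
  -(lst.length : Int) ≤ i ∨ i = (lst.length : Int) - 1
instance (lst : List Int) (i : Int) : Decidable (Pre_allPermutationsAfterElement lst i) := by
  unfold Pre_allPermutationsAfterElement; infer_instance
def pvWitness_allPermutationsAfterElement : List Int × Int := ([1, 2, 3], 1)
def Spec_allPermutationsAfterElement (lst : List Int) (i : Int) (out : List (List Int)) : Prop := out = allPermutationsAfterElement_alt lst i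
instance (lst : List Int) (i : Int) (out : List (List Int)) : Decidable (Spec_allPermutationsAfterElement lst i out) := by unfold Spec_allPermutationsAfterElement; infer_instance

-- ===== CLAIM (what is proved, stated in full; the proofs are below) =====
def Claim_equal_allPermutationsAfterElement : Prop := ∀ (lst : List Int) (i : Int), Dom_allPermutationsAfterElement lst i → Pre_allPermutationsAfterElement lst i → Spec_allPermutationsAfterElement lst i (allPermutationsAfterElement lst i)

-- ===== LEMMAS AND PROOFS =====

theorem pv_foldl_flatten {γ β : Type} (L : List γ) (g : γ → List β) (init : List β) :
    L.foldl (fun r x => r ++ g x) init = init ++ (L.map g).flatten := by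
  induction L generalizing init with
  | nil => simp
  | cons x xs ih => simp [ih]

theorem pv_attach_foldl {α β : Type} (l : List α) (g : α → List β) :
    l.attach.foldl (fun r x => r ++ g x.1) [] = l.flatMap g := by
  rw [pv_foldl_flatten]
  simp [List.flatMap_def]

-- A's else-branch as a flatMap
theorem pvA_else (lst : List Int) (i : Int) (h : ¬ i = (lst.length : Int) - 1) :
    allPermutationsAfterElement lst i
      = (PySem.List.pyRange i (lst.length : Int) 1).flatMap
          (fun j => allPermutationsAfterElement
            (PySem.List.pySetD (PySem.List.pySetD lst i (PySem.List.pyGetD lst j 0)) j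
              (PySem.List.pyGetD lst i 0)) (i + 1)) := by
  rw [allPermutationsAfterElement, if_neg h]
  exact pv_attach_foldl (PySem.List.pyRange i (lst.length : Int) 1)
    (fun j => allPermutationsAfterElement
      (PySem.List.pySetD (PySem.List.pySetD lst i (PySem.List.pyGetD lst j 0)) j
        (PySem.List.pyGetD lst i 0)) (i + 1))

theorem pvLoop_eq (stack : List (List Int × Int)) (result : List (List Int)) :
    pvLoop stack result
      = result ++ stack.flatMap (fun cp => allPermutationsAfterElement cp.1 cp.2) := by
  fun_induction pvLoop stack result
  · simp
  · rename_i cur rest result ih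
    rw [ih]
    have hbase : allPermutationsAfterElement cur ((cur.length : Int) - 1) = [cur] := by
      rw [allPermutationsAfterElement, if_pos rfl]
    simp [hbase]
  · rename_i cur pos rest result h ih
    rw [ih, pv_foldl_cons]
    simp only [List.flatMap_append, List.flatMap_cons, List.reverse_reverse]
    rw [pvA_else cur pos h]
    simp [List.flatMap_map]

-- ===== VERDICT (by name: the statement is the Claim_ definition above) =====
theorem allPermutationsAfterElement_spec : Claim_equal_allPermutationsAfterElement := by
  intro lst i _ _
  unfold Spec_allPermutationsAfterElement allPermutationsAfterElement_alt
  rw [pvLoop_eq]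
  simp
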